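-- pv_equiv track=rewrite | github.com/rankingdigitalrights/index2018 | csv_json_converters/multiple_services_json_converter.py | _separate_service_related_rows
-- ===== SOURCE A (Python) =====
-- ORDERED_SERVICE_ROWS = ['Category', 'Company', 'Service', 'Total', 'G', 'FoE', 'P']
--
-- def _separate_service_related_rows(all_rows):
--     service_related_rows, skip_indexes = [], []
--     for index, row in enumerate(all_rows):
--         if index in skip_indexes:
--             continue
--         elif row[0] == ORDERED_SERVICE_ROWS[0]:
--             service_related_rows.append(all_rows[index:index+len(ORDERED_SERVICE_ROWS)])
--             skip_indexes.extend([ind for ind in range(index, index+len(ORDERED_SERVICE_ROWS))])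
--     return service_related_rows
-- ===== SOURCE B (Python) =====
-- ORDERED_SERVICE_ROWS = ['Category', 'Company', 'Service', 'Total', 'G', 'FoE', 'P']
--
-- def _separate_service_related_rows(all_rows):
--     n = len(ORDERED_SERVICE_ROWS)
--     starts = [i for i, row in enumerate(all_rows) if row[0] == ORDERED_SERVICE_ROWS[0]]
--     result = []
--     next_allowed = 0
--     for i in starts:
--         if i >= next_allowed:
--             result.append(all_rows[i:i + n])
--             next_allowed = i + n
--     return result
-- ===== Notes on version B (the rewrite author's own statement) =====
-- stated objective: simpler
-- what changed: Replaces the single scan with a growing skip-index list (a linear membership test per row) by a filter pass collecting all 'Category' start positions followed by a greedy non-overlapping selection pass keeping one integer threshold instead of a skip list.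
-- outside the precondition, e.g. on _separate_service_related_rows([['Category'], []]): A returns [[['Category'], []]], B raises IndexError
import Mathlib
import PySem

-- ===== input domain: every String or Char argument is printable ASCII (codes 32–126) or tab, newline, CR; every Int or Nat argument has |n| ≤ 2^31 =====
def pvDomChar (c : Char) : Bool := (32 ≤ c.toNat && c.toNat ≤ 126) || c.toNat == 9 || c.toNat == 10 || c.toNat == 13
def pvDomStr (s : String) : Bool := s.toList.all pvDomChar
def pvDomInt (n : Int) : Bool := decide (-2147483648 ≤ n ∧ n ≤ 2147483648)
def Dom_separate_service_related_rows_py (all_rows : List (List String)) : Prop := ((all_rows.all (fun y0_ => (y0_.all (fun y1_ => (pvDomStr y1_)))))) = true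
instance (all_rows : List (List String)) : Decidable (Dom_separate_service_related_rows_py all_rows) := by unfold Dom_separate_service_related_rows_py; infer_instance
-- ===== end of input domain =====

-- B replaces A's scan-with-skip-list by a filter pass over start positions plus a greedy
-- threshold selection pass: simpler state (one integer instead of a growing index list).


-- ===== PORT A =====
-- the for-loop of A as structural recursion over enumerate(all_rows) with state
-- (service_related_rows, skip_indexes); row[0] is row.headD "" — exact for the nonempty rows Pre_ admits
def pvALoop (all_rows : List (List String)) :
    List (Int × List String) → List (List (List String)) → List Int → List (List (List String))
  | [], srr, _ => srr
  | (index, row) :: rest, srr, skip =>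
    if index ∈ skip then pvALoop all_rows rest srr skip
    else if row.headD "" == "Category" then
      pvALoop all_rows rest
        (srr ++ [PySem.List.slice all_rows (some index) (some (index + 7))])
        (skip ++ PySem.List.pyRange index (index + 7) 1)
    else pvALoop all_rows rest srr skip

def separate_service_related_rows_py (all_rows : List (List String)) : List (List (List String)) :=
  pvALoop all_rows (PySem.List.enumerate all_rows 0) [] []

-- ===== PORT B =====
-- greedy selection pass over the collected start positions, threshold next_allowed
def pvBLoop (all_rows : List (List String)) :
    List Int → List (List (List String)) → Int → List (List (List String))
  | [], res, _ => res
  | i :: rest, res, na =>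
    if i ≥ na then
      pvBLoop all_rows rest (res ++ [PySem.List.slice all_rows (some i) (some (i + 7))]) (i + 7)
    else pvBLoop all_rows rest res na

def separate_service_related_rows_py_alt (all_rows : List (List String)) : List (List (List String)) :=
  let starts := ((PySem.List.enumerate all_rows 0).filter (fun p => p.2.headD "" == "Category")).map (·.1)
  pvBLoop all_rows starts [] 0

-- ===== PRECONDITION & SPEC =====
-- Pre_ excludes inputs containing an empty row: there Python A raises IndexError on row[0],
-- except when the empty row falls inside an already-skipped block (where A still returns but
-- B's row[0] raises); both excluded kinds are artefacts of the raising row[0] access.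
def Pre_separate_service_related_rows_py (all_rows : List (List String)) : Prop :=
  ∀ row ∈ all_rows, row ≠ []
instance (all_rows : List (List String)) : Decidable (Pre_separate_service_related_rows_py all_rows) := by unfold Pre_separate_service_related_rows_py; infer_instance
def pvWitness_separate_service_related_rows_py : List (List String) :=
  [["Category"], ["Company"], ["Service"], ["Total"], ["G"], ["FoE"], ["P"], ["x"]]
def Spec_separate_service_related_rows_py (all_rows : List (List String)) (out : List (List (List String))) : Prop := out = separate_service_related_rows_py_alt all_rows
instance (all_rows : List (List String)) (out : List (List (List String))) : Decidable (Spec_separate_service_related_rows_py all_rows out) := by unfold Spec_separate_service_related_rows_py; infer_instance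

-- ===== CLAIM (what is proved, stated in full; the proofs are below) =====
def Claim_equal_separate_service_related_rows_py : Prop := ∀ (all_rows : List (List String)), Dom_separate_service_related_rows_py all_rows → Pre_separate_service_related_rows_py all_rows → Spec_separate_service_related_rows_py all_rows (separate_service_related_rows_py all_rows)

-- ===== LEMMAS AND PROOFS =====

-- Core invariant: along the scan the skip list is, on all still-to-come indices (≥ k),
-- exactly the half-line below the greedy threshold na.
lemma pvLoop_eq (all_rows : List (List String)) :
    ∀ (pend : List (List String)) (k : Int) (skip : List Int) (na : Int)
      (srr : List (List (List String))),
      (∀ j : Int, k ≤ j → (j ∈ skip ↔ j < na)) →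
      pvALoop all_rows (PySem.List.enumerate pend k) srr skip =
      pvBLoop all_rows
        (((PySem.List.enumerate pend k).filter (fun p => p.2.headD "" == "Category")).map (·.1))
        srr na := by
  intro pend
  induction pend with
  | nil => intro k skip na srr _; simp [PySem.List.enumerate_nil, pvALoop, pvBLoop]
  | cons row rest ih =>
    intro k skip na srr hinv
    rw [PySem.List.enumerate_cons]
    by_cases hk : k ∈ skip
    · have hklt : k < na := (hinv k le_rfl).mp hk
      simp only [pvALoop, if_pos hk, List.filter_cons]
      by_cases hp : (row.headD "" == "Category") = true
      · simp only [hp, if_pos, List.map_cons, pvBLoop]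
        have : ¬ k ≥ na := by omega
        rw [if_neg this]
        exact ih (k+1) skip na srr (fun j hj => hinv j (by omega))
      · rw [if_neg hp]
        exact ih (k+1) skip na srr (fun j hj => hinv j (by omega))
    · have hkge : na ≤ k := by
        by_contra h
        exact hk ((hinv k le_rfl).mpr (by omega))
      simp only [pvALoop, if_neg hk, List.filter_cons]
      by_cases hp : (row.headD "" == "Category") = true
      · simp only [hp, if_pos, List.map_cons, pvBLoop]
        rw [if_pos (by omega)]
        refine ih (k+1) _ (k+7) _ ?_
        intro j hj
        simp only [List.mem_append, PySem.List.mem_pyRange_one]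
        constructor
        · rintro (hjs | ⟨h1, h2⟩)
          · have := (hinv j (by omega)).mp hjs; omega
          · omega
        · intro hlt; right; omega
      · rw [if_neg hp, if_neg hp]
        exact ih (k+1) skip na srr (fun j hj => hinv j (by omega))

-- ===== VERDICT (by name: the statement is the Claim_ definition above) =====
theorem separate_service_related_rows_py_spec : Claim_equal_separate_service_related_rows_py := by
  intro all_rows _ _
  unfold Spec_separate_service_related_rows_py separate_service_related_rows_py
    separate_service_related_rows_py_alt
  exact pvLoop_eq all_rows all_rows 0 [] 0 [] (by intro j _; simp; omega)
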